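-- pv_equiv track=rewrite | github.com/YogeshPhuyal/myprojects | function2.py | arm
-- ===== SOURCE A (Python) =====
-- def arm(n):
--     sum=0
--     while n > 0:
--          num = n % 10
--          sum = sum + num ** 3
--          d=n//10
--          n=d
--     return sum
-- ===== SOURCE B (Python) =====
-- def arm(n):
--     if n <= 0:
--         return 0
--     return sum(int(ch) ** 3 for ch in str(n))
-- ===== Notes on version B (the rewrite author's own statement) =====
-- stated objective: idiomatic
-- what changed: B extracts digits from the decimal string representation with a generator-expression sum instead of A's while-loop peeling digits with % and // into a mutable accumulator.
import Mathlib
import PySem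

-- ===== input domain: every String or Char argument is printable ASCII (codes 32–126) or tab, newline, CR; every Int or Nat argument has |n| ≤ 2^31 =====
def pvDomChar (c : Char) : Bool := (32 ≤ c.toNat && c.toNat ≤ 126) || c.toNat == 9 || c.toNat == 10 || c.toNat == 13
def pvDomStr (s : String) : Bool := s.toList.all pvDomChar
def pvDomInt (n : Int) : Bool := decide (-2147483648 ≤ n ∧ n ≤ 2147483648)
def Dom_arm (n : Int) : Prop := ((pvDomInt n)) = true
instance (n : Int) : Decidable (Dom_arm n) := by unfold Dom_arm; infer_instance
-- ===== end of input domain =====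

-- B computes the digit-cube sum from the decimal string of n instead of peeling digits with % and // (idiomatic rewrite, same cost).

-- ===== PORT A =====
-- the while-loop of A: state (n, sum), one iteration per digit
def armLoop (n sum : Int) : Int :=
  if 0 < n then
    armLoop (PySem.Int.floordiv n 10) (sum + (PySem.Int.mod n 10) ^ 3)
  else sum
termination_by n.toNat
decreasing_by
  have h10 : PySem.Int.floordiv n 10 = n.fdiv 10 := rfl
  have : n.fdiv 10 < n := by
    rw [Int.fdiv_eq_ediv]; simp; omega
  simp only [h10]; omega

def arm (n : Int) : Int := armLoop n 0

-- ===== PORT B =====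
def arm_alt (n : Int) : Int :=
  if n ≤ 0 then 0
  else ((PySem.Int.toChars n).map (fun c => ((PySem.Int.ofChars? [c]).getD 0) ^ 3)).sum

-- ===== PRECONDITION & SPEC =====
def Spec_arm (n : Int) (out : Int) : Prop := out = arm_alt n
instance (n : Int) (out : Int) : Decidable (Spec_arm n out) := by unfold Spec_arm; infer_instance

-- ===== CLAIM (what is proved, stated in full; the proofs are below) =====
def Claim_equal_arm : Prop := ∀ (n : Int), Dom_arm n → Spec_arm n (arm n)

-- ===== LEMMAS AND PROOFS =====

-- recursive digit-cube sum on Nat, the common reference of both ports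
def gsum (m : Nat) : Int :=
  if h : m = 0 then 0
  else ((m % 10 : Nat) : Int) ^ 3 + gsum (m / 10)
termination_by m
decreasing_by exact Nat.div_lt_self (Nat.pos_of_ne_zero h) (by norm_num)

lemma fdiv_ten (m : Nat) : Int.fdiv (m : Int) 10 = ((m / 10 : Nat) : Int) := by
  rw [Int.fdiv_eq_ediv]; simp

lemma fmod_ten (m : Nat) : Int.fmod (m : Int) 10 = ((m % 10 : Nat) : Int) := by
  rw [Int.fmod_eq_emod]; simp

lemma armLoop_eq (m : Nat) : ∀ (n s : Int), n.toNat = m → armLoop n s = gsum m + s := by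
  induction m using Nat.strong_induction_on with
  | _ m ih =>
    intro n s hm
    rw [armLoop]
    split_ifs with h
    · have hn : n = (m : Int) := by omega
      subst hn
      have hfd : PySem.Int.floordiv (m : Int) 10 = ((m / 10 : Nat) : Int) := fdiv_ten m
      have hfm : PySem.Int.mod (m : Int) 10 = ((m % 10 : Nat) : Int) := fmod_ten m
      have hrec := ih (m / 10) (Nat.div_lt_self (by omega) (by norm_num))
        (PySem.Int.floordiv (m : Int) 10) (s + (PySem.Int.mod (m : Int) 10) ^ 3)
        (by rw [hfd]; omega)
      rw [hrec, hfm]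
      have hm0 : m ≠ 0 := by omega
      conv_rhs => rw [gsum]
      rw [dif_neg hm0]
      ring
    · have : m = 0 := by omega
      subst this
      rw [gsum]; simp

def cube (c : Char) : Int := ((PySem.Int.ofChars? [c]).getD 0) ^ 3

lemma cube_digitChar (d : Nat) (h : d < 10) : cube (Nat.digitChar d) = (d : Int) ^ 3 := by
  unfold cube; interval_cases d <;> decide

lemma toDigitsCore_sum (fuel : Nat) : ∀ (m : Nat), m ≤ fuel → ∀ (acc : List Char),
    ((Nat.toDigitsCore 10 (fuel + 1) m acc).map cube).sum
      = gsum m + (acc.map cube).sum := by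
  induction fuel with
  | zero =>
    intro m hm acc
    have : m = 0 := by omega
    subst this
    rw [gsum]
    simp [Nat.toDigitsCore, cube_digitChar 0 (by norm_num)]
  | succ fuel ih =>
    intro m hm acc
    rw [Nat.toDigitsCore]
    split_ifs with h
    · -- m / 10 = 0
      by_cases hm0 : m = 0
      · subst hm0; rw [gsum]; simp [cube_digitChar 0 (by norm_num)]
      · conv_rhs => rw [gsum]
        rw [dif_neg hm0, h, gsum]
        simp [cube_digitChar (m % 10) (Nat.mod_lt _ (by norm_num))]
    · -- m / 10 ≠ 0, so m > 0
      have hm0 : m ≠ 0 := by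
        intro hz; subst hz; simp at h
      have hlt : m / 10 ≤ fuel := by
        have := Nat.div_lt_self (Nat.pos_of_ne_zero hm0) (show 1 < 10 by norm_num)
        omega
      rw [ih (m / 10) hlt (Nat.digitChar (m % 10) :: acc)]
      conv_rhs => rw [gsum]
      rw [dif_neg hm0]
      simp only [List.map_cons, List.sum_cons,
        cube_digitChar (m % 10) (Nat.mod_lt _ (by norm_num))]
      ring

lemma toDigits_sum (m : Nat) :
    ((Nat.toDigits 10 m).map cube).sum = gsum m := by
  have := toDigitsCore_sum m m (le_refl m) []
  simpa [Nat.toDigits] using this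

-- ===== VERDICT (by name: the statement is the Claim_ definition above) =====
theorem arm_spec : Claim_equal_arm := by
  intro n _
  unfold Spec_arm arm arm_alt
  rw [armLoop_eq n.toNat n 0 rfl]
  split_ifs with h
  · have : n.toNat = 0 := by omega
    rw [this, gsum]; simp
  · have hneg : ¬ n < 0 := by omega
    show gsum n.toNat + 0 = ((PySem.Int.toChars n).map cube).sum
    rw [PySem.Int.toChars]
    simp [hneg, toDigits_sum]
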